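-- pv_equiv track=rewrite | github.com/rsumner31/urh12 | src/urh/plugins/ZeroHide/ZeroHideAction.py | __get_zero_seq_indexes
-- ===== SOURCE A (Python) =====
-- def __get_zero_seq_indexes(block: str, following_zeros: int):
--     """
--     :rtype: list[tuple of int]
--     """
--
--     result = []
--     if following_zeros > len(block):
--         return result
--
--     zero_counter = 0
--     for i in range(0, len(block)):
--         if block[i] == "0":
--             zero_counter += 1
--         else:
--             if zero_counter >= following_zeros:
--                 result.append((i-zero_counter, i))
--             zero_counter = 0
--
--     if zero_counter >= following_zeros:
--         result.append((len(block) - zero_counter, len(block)))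
--
--     return result
-- ===== SOURCE B (Python) =====
-- def __get_zero_seq_indexes(block: str, following_zeros: int):
--     """Run-based scan: jump over each maximal zero run and keep it if long enough."""
--     result = []
--     n = len(block)
--     i = 0
--     while i < n:
--         if block[i] == "0":
--             j = i
--             while j < n and block[j] == "0":
--                 j += 1
--             if j - i >= following_zeros:
--                 result.append((i, j))
--             i = j
--         else:
--             i += 1
--     return result
-- ===== Notes on version B (the rewrite author's own statement) =====
-- stated objective: simpler
-- what changed: Replaced the per-character zero_counter/flush loop with a run-based scan that jumps over each maximal zero run (inner while over the run) and appends its (start, end) when long enough, dropping the now-unneeded length guard.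
-- outside the precondition, e.g. on __get_zero_seq_indexes('a', 0): A returns [(0, 0), (1, 1)], B returns []; on __get_zero_seq_indexes('', 0): A returns [(0, 0)], B returns []; on __get_zero_seq_indexes('0a0', -1): A returns [(0, 1), (2, 3)], B returns [(0, 1), (2, 3)]
import Mathlib
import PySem

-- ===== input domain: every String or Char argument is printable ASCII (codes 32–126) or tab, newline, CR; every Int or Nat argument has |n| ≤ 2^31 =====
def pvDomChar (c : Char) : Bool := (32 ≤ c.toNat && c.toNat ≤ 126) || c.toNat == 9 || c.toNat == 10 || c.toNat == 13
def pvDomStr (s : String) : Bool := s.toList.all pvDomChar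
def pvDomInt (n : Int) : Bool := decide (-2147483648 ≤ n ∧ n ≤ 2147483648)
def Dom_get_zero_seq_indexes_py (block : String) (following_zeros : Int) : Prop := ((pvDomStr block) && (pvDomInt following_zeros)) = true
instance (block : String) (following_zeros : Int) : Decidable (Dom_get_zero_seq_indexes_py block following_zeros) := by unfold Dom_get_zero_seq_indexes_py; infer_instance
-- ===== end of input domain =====

-- B replaces A's per-character counter/flush loop by a run-based scan that jumps over each
-- maximal zero run (objective: simpler); non-positive following_zeros is excluded by Pre_.

-- ===== PORT A =====
-- A's per-character loop: state = (index i, zero_counter zc, result res)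
def goA (k : Int) : List Char → Nat → Nat → List (Int × Int) → List (Int × Int)
  | [], i, zc, res =>
      if (zc : Int) ≥ k then res ++ [((i : Int) - (zc : Int), (i : Int))] else res
  | c :: rest, i, zc, res =>
      if c == '0' then goA k rest (i + 1) (zc + 1) res
      else goA k rest (i + 1) 0
             (if (zc : Int) ≥ k then res ++ [((i : Int) - (zc : Int), (i : Int))] else res)

def get_zero_seq_indexes_py (block : String) (following_zeros : Int) : List (Int × Int) :=
  if following_zeros > (block.toList.length : Int) then []
  else goA following_zeros block.toList 0 0 []

-- ===== PORT B =====
-- B's outer while-loop: at a '0' take the whole run (takeWhile/dropWhile = the inner while),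
-- else step one char; the fuel argument (initially the length) only makes the loop structural.
def goB (k : Int) : Nat → List Char → Nat → List (Int × Int)
  | _, [], _ => []
  | 0, _ :: _, _ => []
  | fuel + 1, c :: rest, i =>
      if c == '0' then
        let z := ((c :: rest).takeWhile (fun d => d == '0')).length
        (if (z : Int) ≥ k then [((i : Int), ((i + z : Nat) : Int))] else []) ++
          goB k fuel ((c :: rest).dropWhile (fun d => d == '0')) (i + z)
      else goB k fuel rest (i + 1)

def get_zero_seq_indexes_py_alt (block : String) (following_zeros : Int) : List (Int × Int) :=
  goB following_zeros block.toList.length block.toList 0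

-- ===== PRECONDITION & SPEC =====
-- Pre_ excludes non-positive following_zeros, outside the function's natural domain ("at least
-- this many zeros"), where A's counter flush emits spurious empty ranges (i, i) at every
-- position not preceded by a zero run that B's run scan does not produce.
def Pre_get_zero_seq_indexes_py (block : String) (following_zeros : Int) : Prop :=
  1 ≤ following_zeros
instance (block : String) (following_zeros : Int) : Decidable (Pre_get_zero_seq_indexes_py block following_zeros) := by
  unfold Pre_get_zero_seq_indexes_py; infer_instance

def pvWitness_get_zero_seq_indexes_py : String × Int := ("a00b", 2)

def Spec_get_zero_seq_indexes_py (block : String) (following_zeros : Int) (out : List (Int × Int)) : Prop :=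
  out = get_zero_seq_indexes_py_alt block following_zeros
instance (block : String) (following_zeros : Int) (out : List (Int × Int)) : Decidable (Spec_get_zero_seq_indexes_py block following_zeros out) := by
  unfold Spec_get_zero_seq_indexes_py; infer_instance

-- ===== CLAIM (what is proved, stated in full; the proofs are below) =====
def Claim_equal_get_zero_seq_indexes_py : Prop := ∀ (block : String) (following_zeros : Int), Dom_get_zero_seq_indexes_py block following_zeros → Pre_get_zero_seq_indexes_py block following_zeros → Spec_get_zero_seq_indexes_py block following_zeros (get_zero_seq_indexes_py block following_zeros)

-- ===== LEMMAS AND PROOFS =====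

-- A's loop only appends: the accumulator factors out
lemma goA_acc (k : Int) : ∀ (l : List Char) (i zc : Nat) (res : List (Int × Int)),
    goA k l i zc res = res ++ goA k l i zc [] := by
  intro l
  induction l with
  | nil => intro i zc res; simp only [goA]; split_ifs <;> simp
  | cons c rest ih =>
      intro i zc res
      simp only [goA]
      split_ifs with hc hz
      · exact ih _ _ _
      · rw [ih _ _ (res ++ _), ih _ _ ([] ++ _)]; simp
      · rw [ih _ _ res]

-- running A's loop through a block of zeros just moves the counters
lemma goA_zeros (k : Int) : ∀ (z : Nat) (tail : List Char) (i zc : Nat) (res : List (Int × Int)),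
    goA k (List.replicate z '0' ++ tail) i zc res = goA k tail (i + z) (zc + z) res := by
  intro z
  induction z with
  | zero => intro tail i zc res; simp
  | succ z ih =>
      intro tail i zc res
      rw [List.replicate_succ]
      simp only [List.cons_append, goA, beq_self_eq_true, if_true]
      rw [ih]
      congr 1 <;> omega

-- a takeWhile (== '0') block is a replicate of '0'
lemma takeWhile_zero_replicate (l : List Char) :
    l.takeWhile (fun d => d == '0') = List.replicate (l.takeWhile (fun d => d == '0')).length '0' := by
  apply List.eq_replicate_of_mem
  intro b hb
  have := List.mem_takeWhile_imp hb
  simpa using this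

-- the core equivalence for a positive threshold
lemma goA_eq_goB (k : Int) (hk : 1 ≤ k) :
    ∀ (n : Nat) (l : List Char), l.length ≤ n → ∀ (fuel : Nat), l.length ≤ fuel → ∀ i : Nat,
      goA k l i 0 [] = goB k fuel l i := by
  intro n
  induction n with
  | zero =>
      intro l hl fuel hf i
      have : l = [] := List.eq_nil_of_length_eq_zero (Nat.le_zero.mp hl)
      subst this
      have : goB k fuel ([] : List Char) i = [] := by cases fuel <;> rfl
      rw [this]
      simp only [goA]
      rw [if_neg (by omega)]
  | succ n ih =>
      intro l hl fuel hf i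
      cases l with
      | nil =>
          have : goB k fuel ([] : List Char) i = [] := by cases fuel <;> rfl
          rw [this]
          simp only [goA]
          rw [if_neg (by omega)]
      | cons c rest =>
          have hl' : rest.length ≤ n := by simpa using hl
          cases fuel with
          | zero => simp at hf
          | succ m =>
          have hf' : rest.length ≤ m := by simpa using hf
          by_cases hc : c = '0'
          · subst hc
            set z := (('0' :: rest).takeWhile (fun d => d == '0')).length with hz
            set tail := ('0' :: rest).dropWhile (fun d => d == '0') with htail
            have hdecomp : '0' :: rest = List.replicate z '0' ++ tail := by
              rw [hz, htail]
              conv_lhs => rw [← List.takeWhile_append_dropWhile (p := fun d => d == '0') (l := '0' :: rest)]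
              rw [← takeWhile_zero_replicate]
            have hz1 : 1 ≤ z := by rw [hz]; simp
            have hlen : z + tail.length = rest.length + 1 := by
              have := congrArg List.length hdecomp
              simpa using this.symm
            have hstep : goA k ('0' :: rest) i 0 [] = goA k tail (i + z) z [] := by
              rw [hdecomp, goA_zeros]
              simp
            rw [hstep]
            simp only [goB, beq_self_eq_true, if_true]
            rw [← hz, ← htail]
            have hB0 : ∀ (m j : Nat), goB k m ([] : List Char) j = [] := by
              intro m j; cases m <;> rfl
            cases htl : tail with
            | nil =>
                simp only [goA]
                split_ifs with h <;> simp [hB0]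
            | cons d rest2 =>
                have hd : (d == '0') = false := by
                  have h2 := List.head_dropWhile_not (fun d => d == '0') (l := '0' :: rest)
                    (by rw [← htail, htl]; simp)
                  simpa [← htail, htl] using h2
                have hm : rest2.length + 1 ≤ m := by
                  have : tail.length = rest2.length + 1 := by rw [htl]; simp
                  omega
                cases m with
                | zero => omega
                | succ m2 =>
                simp only [goA, hd, Bool.false_eq_true, if_false]
                rw [goA_acc]
                have hr2 : rest2.length ≤ n := by
                  have : tail.length = rest2.length + 1 := by rw [htl]; simp
                  omega
                rw [ih rest2 hr2 m2 (by omega) (i + z + 1)]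
                simp only [goB, hd, Bool.false_eq_true, if_false]
                split_ifs with h <;> simp
          · have hc' : (c == '0') = false := by simpa using hc
            simp only [goA, goB, hc', Bool.false_eq_true, if_false]
            rw [if_neg (by omega)]
            exact ih rest hl' m hf' (i + 1)

-- when the threshold exceeds the length, B finds nothing
lemma goB_nil_of_big (k : Int) :
    ∀ (fuel : Nat) (l : List Char), l.length ≤ fuel → (l.length : Int) < k → ∀ i,
      goB k fuel l i = [] := by
  intro fuel
  induction fuel with
  | zero =>
      intro l hl _ i
      have : l = [] := List.eq_nil_of_length_eq_zero (Nat.le_zero.mp hl)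
      subst this; rfl
  | succ n ih =>
      intro l hl hbig i
      cases l with
      | nil => rfl
      | cons c rest =>
          have hl' : rest.length ≤ n := by simpa using hl
          have hbig' : (rest.length : Int) + 1 < k := by simpa using hbig
          by_cases hc : (c == '0') = true
          · simp only [goB, hc, if_true]
            set z := ((c :: rest).takeWhile (fun d => d == '0')).length with hz
            set tail := ((c :: rest).dropWhile (fun d => d == '0')) with htail
            have hzle : z ≤ rest.length + 1 := by
              rw [hz]
              exact (List.takeWhile_sublist (l := c :: rest) (fun d => d == '0')).length_le
            have htle : tail.length ≤ rest.length := by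
              rw [htail, List.dropWhile_cons, if_pos hc]
              exact (List.dropWhile_sublist (l := rest) (p := fun d => d == '0')).length_le
            rw [if_neg (by omega), ih tail (by omega) (by omega) (i + z)]
            simp
          · simp only [goB, hc, Bool.false_eq_true, if_false]
            exact ih rest hl' (by omega) (i + 1)

-- ===== VERDICT (by name: the statement is the Claim_ definition above) =====
theorem get_zero_seq_indexes_py_spec : Claim_equal_get_zero_seq_indexes_py := by
  intro block f _ hk
  unfold Spec_get_zero_seq_indexes_py get_zero_seq_indexes_py get_zero_seq_indexes_py_alt
  by_cases hg : f > (block.toList.length : Int)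
  · rw [if_pos hg, goB_nil_of_big f block.toList.length block.toList (le_refl _) (by omega) 0]
  · rw [if_neg hg, goA_eq_goB f hk block.toList.length block.toList (le_refl _) block.toList.length (le_refl _) 0]
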